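-- pv_equiv track=rewrite | github.com/fzliu/radient | radient/orchestrate/runners.py | _datalen
-- ===== SOURCE A (Python) =====
-- from collections.abc import Iterator
-- from typing import Any, Dict, List, Tuple, Type, Optional, Union
--
-- def _datalen(
--     data: Union[Any, List[Any], Dict[str, Union[Any, List[Any]]]]
-- ) -> Iterator:
--     """
--     """
--     if isinstance(data, dict):
--         return sum([_datalen(v) for v in data.values()])
--     elif isinstance(data, list):
--         return len(data)
--     else:
--         return 1 if data else 0
-- ===== SOURCE B (Python) =====
-- def _datalen(data):
--     total = 0
--     stack = [data]
--     while stack: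
--         item = stack.pop()
--         if isinstance(item, dict):
--             stack.extend(item.values())
--         elif isinstance(item, list):
--             total += len(item)
--         else:
--             total += 1 if item else 0
--     return total
-- ===== Notes on version B (the rewrite author's own statement) =====
-- stated objective: alternative
-- what changed: Replaced A's recursion over the nested structure (sum of a recursively-built list) by an iterative worklist traversal: a stack holds pending items, dict values are pushed, lists contribute their length, scalars their truthiness.
import Mathlib
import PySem

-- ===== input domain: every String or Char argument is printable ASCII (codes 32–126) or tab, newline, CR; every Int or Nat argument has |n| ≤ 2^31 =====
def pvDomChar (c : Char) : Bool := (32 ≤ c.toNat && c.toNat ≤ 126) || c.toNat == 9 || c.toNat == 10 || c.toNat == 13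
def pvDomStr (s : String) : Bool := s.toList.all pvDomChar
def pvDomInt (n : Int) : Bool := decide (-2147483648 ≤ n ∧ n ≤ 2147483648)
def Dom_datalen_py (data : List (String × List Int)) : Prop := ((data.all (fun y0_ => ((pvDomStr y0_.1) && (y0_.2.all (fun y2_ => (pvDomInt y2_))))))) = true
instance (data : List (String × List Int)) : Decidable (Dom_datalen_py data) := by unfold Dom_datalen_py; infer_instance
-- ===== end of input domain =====

-- B replaces A's recursion by an explicit stack-based iterative traversal; return values proved equal on Dom.
-- ===== PORT A =====
-- _datalen on a dict: sum([_datalen(v) for v in data.values()]); each value v is a list, so _datalen(v) = len(v).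
def datalen_py (data : List (String × List Int)) : Int :=
  (((PySem.Dict.ofList data).values).map (fun v => (v.length : Int))).sum

-- ===== PORT B =====
-- while stack: item = stack.pop(); lists add their length to total.  Python pops from the END,
-- so after the initial dict is popped and its values extended onto the stack, the remaining
-- stack (all lists, in pop order) is the reversed values list; pvAltLoop is that while-loop.
def pvAltLoop (stack : List (List Int)) (total : Int) : Int :=
  match stack with
  | [] => total
  | v :: rest => pvAltLoop rest (total + v.length)

def datalen_py_alt (data : List (String × List Int)) : Int :=
  pvAltLoop ((PySem.Dict.ofList data).values).reverse 0

-- ===== PRECONDITION & SPEC =====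
def Spec_datalen_py (data : List (String × List Int)) (out : Int) : Prop := out = datalen_py_alt data
instance (data : List (String × List Int)) (out : Int) : Decidable (Spec_datalen_py data out) := by unfold Spec_datalen_py; infer_instance

-- ===== CLAIM (what is proved, stated in full; the proofs are below) =====
def Claim_equal_datalen_py : Prop := ∀ (data : List (String × List Int)), Dom_datalen_py data → Spec_datalen_py data (datalen_py data)

-- ===== LEMMAS AND PROOFS =====

-- ===== VERDICT (by name: the statement is the Claim_ definition above) =====
lemma pvAltLoop_eq (s : List (List Int)) (t : Int) :
    pvAltLoop s t = t + ((s.map (fun v => (v.length : Int))).sum) := by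
  induction s generalizing t with
  | nil => simp [pvAltLoop]
  | cons v rest ih => simp [pvAltLoop, ih]; ring

theorem datalen_py_spec : Claim_equal_datalen_py := by
  intro data _
  unfold Spec_datalen_py datalen_py datalen_py_alt
  rw [pvAltLoop_eq, List.map_reverse, List.sum_reverse]
  ring
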